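-- pv_equiv track=rewrite | github.com/RichardFeder/ciber | ciber/pseudo_cl/mkk_compute.py | group_idxs
-- ===== SOURCE A (Python) =====
-- def group_idxs(idx_list, imdim=1024):
--
--     grouped_idx_list = []
--     used_list = []
--
--     for idx in idx_list:
--         for idx2 in idx_list:
--             if idx2[0]%imdim ==(imdim-idx[0])%imdim and idx2[1]%imdim==(imdim-idx[1])%imdim and idx2 not in used_list:
--                 grouped_idx_list.append([idx, idx2])
--                 used_list.append(idx)
--                 used_list.append(idx2)
--
--     return grouped_idx_list
-- ===== SOURCE B (Python) =====
-- def group_idxs(idx_list, imdim=1024):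
--     # Bucket every index by its (x%imdim, y%imdim) key once; each outer idx then
--     # looks up its mirror bucket directly instead of scanning the whole list,
--     # and a set replaces the linear used-list membership test.
--     buckets = {}
--     for idx2 in idx_list:
--         buckets.setdefault((idx2[0] % imdim, idx2[1] % imdim), []).append(idx2)
--     grouped_idx_list = []
--     used = set()
--     for idx in idx_list:
--         cands = buckets.get(((-idx[0]) % imdim, (-idx[1]) % imdim))
--         if cands:
--             for idx2 in cands:
--                 t2 = tuple(idx2)
--                 if t2 not in used:
--                     grouped_idx_list.append([idx, idx2])
--                     used.add(tuple(idx))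
--                     used.add(t2)
--             cands.clear()  # every member is used now; never rescan it
--     return grouped_idx_list
-- ===== Notes on version B (the rewrite author's own statement) =====
-- stated objective: faster
-- what changed: B buckets all indices once by (x%imdim, y%imdim) in a dict, so each outer index looks up its mirror bucket directly (clearing a bucket after it is consumed) and a set replaces the linear used-list membership test, instead of A's full inner rescan of idx_list with a list membership check per hit.
-- outside the precondition, e.g. on group_idxs([[2], [10]], 77): A returns [], B raises IndexError
import Mathlib
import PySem

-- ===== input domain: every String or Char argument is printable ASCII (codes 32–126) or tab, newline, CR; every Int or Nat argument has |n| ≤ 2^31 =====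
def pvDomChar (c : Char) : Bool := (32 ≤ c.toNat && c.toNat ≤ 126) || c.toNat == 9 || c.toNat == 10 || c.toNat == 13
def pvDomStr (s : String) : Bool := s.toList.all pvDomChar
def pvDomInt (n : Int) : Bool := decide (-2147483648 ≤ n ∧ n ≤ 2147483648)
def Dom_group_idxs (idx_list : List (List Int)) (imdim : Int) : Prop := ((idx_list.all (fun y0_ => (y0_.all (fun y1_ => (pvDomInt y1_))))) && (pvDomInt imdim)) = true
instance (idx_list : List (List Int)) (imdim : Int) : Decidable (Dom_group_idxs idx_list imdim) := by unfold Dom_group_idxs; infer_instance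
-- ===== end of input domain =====

-- B replaces A's quadratic inner rescans by one bucketing pass keyed by (x%imdim, y%imdim)
-- plus a set for the used-membership test (objective: faster).

-- ===== PORT A =====
-- idx[0]/idx[1] are ported as List.getD 0/1 with default 0: exact under Pre_ (every list has ≥ 2 entries).
def group_idxs (idx_list : List (List Int)) (imdim : Int) : List (List (List Int)) :=
  (idx_list.foldl (fun st idx =>
      idx_list.foldl (fun st2 idx2 =>
        if PySem.Int.mod (idx2.getD 0 0) imdim = PySem.Int.mod (imdim - idx.getD 0 0) imdim
            ∧ PySem.Int.mod (idx2.getD 1 0) imdim = PySem.Int.mod (imdim - idx.getD 1 0) imdim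
            ∧ idx2 ∉ st2.2 then
          (st2.1 ++ [[idx, idx2]], st2.2 ++ [idx, idx2])
        else st2) st)
    (([] : List (List (List Int))), ([] : List (List Int)))).1

-- ===== PORT B =====
-- (idx2[0]%imdim, idx2[1]%imdim), the bucket key of Source B
def gKey (imdim : Int) (l : List Int) : Int × Int :=
  (PySem.Int.mod (l.getD 0 0) imdim, PySem.Int.mod (l.getD 1 0) imdim)

-- ((-idx[0])%imdim, (-idx[1])%imdim), the mirror key of Source B
def gMKey (imdim : Int) (l : List Int) : Int × Int :=
  (PySem.Int.mod (-(l.getD 0 0)) imdim, PySem.Int.mod (-(l.getD 1 0)) imdim)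

-- buckets.setdefault(key, []).append(idx2)  ==  buckets[key] = buckets.get(key, []) + [idx2]
def gBuckets (idx_list : List (List Int)) (imdim : Int) : PySem.Dict (Int × Int) (List (List Int)) :=
  idx_list.foldl (fun d idx2 => d.insert (gKey imdim idx2) (d.getD (gKey imdim idx2) [] ++ [idx2]))
    PySem.Dict.empty

def group_idxs_alt (idx_list : List (List Int)) (imdim : Int) : List (List (List Int)) :=
  let buckets := gBuckets idx_list imdim
  (idx_list.foldl (fun st idx =>
      match st.2.2.get? (gMKey imdim idx) with
      | none => st                -- buckets.get(key) is None
      | some cands =>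
        if cands = [] then st     -- 'if cands:' falls through on the empty list
        else
          let p := cands.foldl (fun p idx2 =>
              if PySem.Set.contains p.2 idx2 then p
              else (p.1 ++ [[idx, idx2]], PySem.Set.add (PySem.Set.add p.2 idx) idx2))
            (st.1, st.2.1)
          (p.1, p.2, st.2.2.insert (gMKey imdim idx) []))   -- cands.clear()
    (([] : List (List (List Int))), (PySem.Set.empty : PySem.Set (List Int)), buckets)).1

-- ===== PRECONDITION & SPEC =====
-- Pre_ excludes imdim = 0 (A raises ZeroDivisionError) and index lists with fewer than two
-- entries: there A usually raises IndexError, but its short-circuit can also return when the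
-- first coordinates never match, while B's bucketing pass always indexes [1] and raises.
def Pre_group_idxs (idx_list : List (List Int)) (imdim : Int) : Prop :=
  imdim ≠ 0 ∧ ∀ l ∈ idx_list, 2 ≤ l.length
instance (idx_list : List (List Int)) (imdim : Int) : Decidable (Pre_group_idxs idx_list imdim) := by
  unfold Pre_group_idxs; infer_instance

def pvWitness_group_idxs : List (List Int) × Int := ([[1, 2], [3, 2], [2, 1]], 4)

def Spec_group_idxs (idx_list : List (List Int)) (imdim : Int) (out : List (List (List Int))) : Prop := out = group_idxs_alt idx_list imdim
instance (idx_list : List (List Int)) (imdim : Int) (out : List (List (List Int))) : Decidable (Spec_group_idxs idx_list imdim out) := by unfold Spec_group_idxs; infer_instance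

-- ===== CLAIM (what is proved, stated in full; the proofs are below) =====
def Claim_equal_group_idxs : Prop := ∀ (idx_list : List (List Int)) (imdim : Int), Dom_group_idxs idx_list imdim → Pre_group_idxs idx_list imdim → Spec_group_idxs idx_list imdim (group_idxs idx_list imdim)

-- ===== LEMMAS AND PROOFS =====

-- (imdim - x) % imdim = (-x) % imdim, so A's condition is exactly key equality
theorem gmod_shift (x b : Int) : PySem.Int.mod (b - x) b = PySem.Int.mod (-x) b := by
  simp [PySem.Int.mod]

theorem gcond_iff (imdim : Int) (idx idx2 : List Int) :
    (PySem.Int.mod (idx2.getD 0 0) imdim = PySem.Int.mod (imdim - idx.getD 0 0) imdim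
      ∧ PySem.Int.mod (idx2.getD 1 0) imdim = PySem.Int.mod (imdim - idx.getD 1 0) imdim)
      ↔ gKey imdim idx2 = gMKey imdim idx := by
  simp [gKey, gMKey, gmod_shift, Prod.ext_iff]

-- abbreviations for the two inner-loop bodies
def gStepA (idx : List Int) (st : List (List (List Int)) × List (List Int)) (idx2 : List Int) :
    List (List (List Int)) × List (List Int) :=
  if idx2 ∉ st.2 then (st.1 ++ [[idx, idx2]], st.2 ++ [idx, idx2]) else st

def gStepB (idx : List Int) (p : List (List (List Int)) × PySem.Set (List Int)) (idx2 : List Int) :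
    List (List (List Int)) × PySem.Set (List Int) :=
  if PySem.Set.contains p.2 idx2 then p
  else (p.1 ++ [[idx, idx2]], PySem.Set.add (PySem.Set.add p.2 idx) idx2)

-- A's inner scan over the whole list is its scan over the mirror bucket
theorem innerA_eq_filter (idx_list : List (List Int)) (imdim : Int) (idx : List Int)
    (st : List (List (List Int)) × List (List Int)) :
    idx_list.foldl (fun st2 idx2 =>
        if PySem.Int.mod (idx2.getD 0 0) imdim = PySem.Int.mod (imdim - idx.getD 0 0) imdim
            ∧ PySem.Int.mod (idx2.getD 1 0) imdim = PySem.Int.mod (imdim - idx.getD 1 0) imdim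
            ∧ idx2 ∉ st2.2 then
          (st2.1 ++ [[idx, idx2]], st2.2 ++ [idx, idx2])
        else st2) st
      = (idx_list.filter (fun x => gKey imdim x = gMKey imdim idx)).foldl (gStepA idx) st := by
  induction idx_list generalizing st with
  | nil => rfl
  | cons x xs ih =>
    by_cases hk : gKey imdim x = gMKey imdim idx
    · have hc := (gcond_iff imdim idx x).2 hk
      simp only [List.foldl_cons, List.filter_cons, hk, decide_true, if_true]
      rw [ih]
      congr 1
      simp only [gStepA, hc.1, hc.2, true_and]
    · simp only [List.foldl_cons, List.filter_cons, hk, decide_false, Bool.false_eq_true,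
        if_false]
      rw [ih]
      congr 1
      rw [if_neg]
      intro h
      exact hk ((gcond_iff imdim idx x).1 ⟨h.1, h.2.1⟩)

-- A's scan over a fully-used bucket is the identity
theorem innerA_all_used (idx : List Int) (G : List (List Int))
    (st : List (List (List Int)) × List (List Int)) (h : ∀ x ∈ G, x ∈ st.2) :
    G.foldl (gStepA idx) st = st := by
  induction G with
  | nil => rfl
  | cons x xs ih =>
    have hx : x ∈ st.2 := h x (by simp)
    have hstep : gStepA idx st x = st := by simp [gStepA, hx]
    simp only [List.foldl_cons, hstep]
    exact ih (fun y hy => h y (by simp [hy]))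

-- the bucket build: get? is none iff no element has that key, else the key's sublist
theorem gBuckets_invariant (idx_list : List (List Int)) (imdim : Int)
    (d : PySem.Dict (Int × Int) (List (List Int))) (k : Int × Int) :
    (idx_list.foldl (fun d idx2 => d.insert (gKey imdim idx2) (d.getD (gKey imdim idx2) [] ++ [idx2])) d).get? k
      = if idx_list.filter (fun x => gKey imdim x = k) = [] then d.get? k
        else some (d.getD k [] ++ idx_list.filter (fun x => gKey imdim x = k)) := by
  induction idx_list generalizing d with
  | nil => simp
  | cons x xs ih =>
    simp only [List.foldl_cons]
    rw [ih]
    by_cases hk : gKey imdim x = k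
    · subst hk
      by_cases h0 : xs.filter (fun y => gKey imdim y = gKey imdim x) = []
      · simp [h0, PySem.Dict.get?_insert_self]
      · simp [h0, PySem.Dict.getD_insert_self]
    · have hne : k ≠ gKey imdim x := fun h => hk h.symm
      simp [PySem.Dict.get?_insert, PySem.Dict.getD_insert, hne, hk]

theorem gBuckets_get? (idx_list : List (List Int)) (imdim : Int) (k : Int × Int) :
    (gBuckets idx_list imdim).get? k
      = if idx_list.filter (fun x => gKey imdim x = k) = [] then none
        else some (idx_list.filter (fun x => gKey imdim x = k)) := by
  have := gBuckets_invariant idx_list imdim PySem.Dict.empty k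
  simpa [gBuckets] using this

-- parallel run of the two inner loops on the same bucket
theorem inner_parallel (idx : List Int) (G : List (List Int))
    (out : List (List (List Int))) (uL : List (List Int)) (uS : PySem.Set (List Int))
    (hmem : ∀ x, x ∈ uL ↔ x ∈ uS) :
    (G.foldl (gStepA idx) (out, uL)).1 = (G.foldl (gStepB idx) (out, uS)).1
    ∧ (∀ x, x ∈ (G.foldl (gStepA idx) (out, uL)).2 ↔ x ∈ (G.foldl (gStepB idx) (out, uS)).2)
    ∧ (∀ x ∈ uS, x ∈ (G.foldl (gStepB idx) (out, uS)).2)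
    ∧ (∀ x ∈ G, x ∈ (G.foldl (gStepB idx) (out, uS)).2) := by
  induction G generalizing out uL uS with
  | nil => exact ⟨rfl, hmem, fun x hx => hx, by simp⟩
  | cons y ys ih =>
    by_cases hy : y ∈ uS
    · have hyL : y ∈ uL := (hmem y).2 hy
      have hcon : PySem.Set.contains uS y = true := (PySem.Set.contains_iff _ _).2 hy
      simp only [List.foldl_cons, gStepA, gStepB, hyL, not_true_eq_false, if_false, hcon, if_true]
      obtain ⟨h1, h2, h3, h4⟩ := ih out uL uS hmem
      exact ⟨h1, h2, h3, fun x hx => by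
        rcases List.mem_cons.1 hx with rfl | hx
        · exact h3 x hy
        · exact h4 x hx⟩
    · have hyL : y ∉ uL := fun h => hy ((hmem y).1 h)
      have hcon : ¬ PySem.Set.contains uS y = true := fun h => hy ((PySem.Set.contains_iff _ _).1 h)
      simp only [List.foldl_cons, gStepA, gStepB, hyL, not_false_eq_true, if_true, hcon]
      have hmem' : ∀ x, x ∈ uL ++ [idx, y] ↔ x ∈ PySem.Set.add (PySem.Set.add uS idx) y := by
        intro x
        simp only [PySem.Set.mem_add, List.mem_append, List.mem_cons,
          List.not_mem_nil, or_false, hmem x]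
        tauto
      obtain ⟨h1, h2, h3, h4⟩ := ih (out ++ [[idx, y]]) (uL ++ [idx, y]) _ hmem'
      refine ⟨h1, h2, fun x hx => h3 x ?_, fun x hx => ?_⟩
      · simp [PySem.Set.mem_add]; tauto
      · rcases List.mem_cons.1 hx with rfl | hx
        · exact h3 x (by simp [PySem.Set.mem_add])
        · exact h4 x hx

-- the dict invariant carried through the main loop of B
def gDictInv (idx_list : List (List Int)) (imdim : Int)
    (D : PySem.Dict (Int × Int) (List (List Int))) (uS : PySem.Set (List Int)) : Prop :=
  ∀ k, (idx_list.filter (fun x => gKey imdim x = k) = [] → D.get? k = none)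
    ∧ (idx_list.filter (fun x => gKey imdim x = k) ≠ [] →
        (D.get? k = some (idx_list.filter (fun x => gKey imdim x = k))
          ∨ (D.get? k = some [] ∧ ∀ x ∈ idx_list.filter (fun x => gKey imdim x = k), x ∈ uS)))

-- the joint outer induction: A's filtered scans = B's bucket lookups
theorem outer_parallel (idx_list rest : List (List Int)) (imdim : Int)
    (out : List (List (List Int))) (uL : List (List Int)) (uS : PySem.Set (List Int))
    (D : PySem.Dict (Int × Int) (List (List Int)))
    (hmem : ∀ x, x ∈ uL ↔ x ∈ uS)
    (hinv : gDictInv idx_list imdim D uS) :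
    (rest.foldl (fun st idx =>
        (idx_list.filter (fun x => gKey imdim x = gMKey imdim idx)).foldl (gStepA idx) st)
      (out, uL)).1
    = (rest.foldl (fun st idx =>
        match st.2.2.get? (gMKey imdim idx) with
        | none => st
        | some cands =>
          if cands = [] then st
          else
            let p := cands.foldl (gStepB idx) (st.1, st.2.1)
            (p.1, p.2, st.2.2.insert (gMKey imdim idx) []))
      (out, uS, D)).1 := by
  induction rest generalizing out uL uS D with
  | nil => rfl
  | cons idx rest ih =>
    simp only [List.foldl_cons]
    rcases hD : D.get? (gMKey imdim idx) with _ | cands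
    · -- no bucket: the mirror group is empty, A's scan is over []
      have hG : idx_list.filter (fun x => gKey imdim x = gMKey imdim idx) = [] := by
        by_contra h
        rcases (hinv (gMKey imdim idx)).2 h with h' | ⟨h', _⟩ <;> rw [hD] at h' <;> cases h'
      rw [hG]
      exact ih out uL uS D hmem hinv
    · by_cases hc : cands = []
      · -- cleared bucket: every member of the mirror group is already used
        subst hc
        have hG : idx_list.filter (fun x => gKey imdim x = gMKey imdim idx) ≠ [] := by
          intro h
          have := (hinv (gMKey imdim idx)).1 h
          rw [hD] at this; cases this
        have hsub : ∀ x ∈ idx_list.filter (fun x => gKey imdim x = gMKey imdim idx), x ∈ uS := by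
          rcases (hinv (gMKey imdim idx)).2 hG with h' | ⟨_, h2⟩
          · rw [hD] at h'
            exact absurd (Option.some.inj h').symm hG
          · exact h2
        have hA : (idx_list.filter (fun x => gKey imdim x = gMKey imdim idx)).foldl
            (gStepA idx) (out, uL) = (out, uL) :=
          innerA_all_used idx _ (out, uL) (fun x hx => (hmem x).2 (hsub x hx))
        rw [hA]
        exact ih out uL uS D hmem hinv
      · -- live bucket: cands is exactly the mirror group; run the two inner loops in parallel
        have hG : idx_list.filter (fun x => gKey imdim x = gMKey imdim idx) ≠ [] := by
          intro h
          have := (hinv (gMKey imdim idx)).1 h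
          rw [hD] at this; cases this
        have hcands : cands = idx_list.filter (fun x => gKey imdim x = gMKey imdim idx) := by
          rcases (hinv (gMKey imdim idx)).2 hG with h' | ⟨h', _⟩ <;> rw [hD] at h'
          · exact Option.some.inj h'
          · exact absurd (Option.some.inj h') hc
        simp only [if_neg hc]
        subst hcands
        obtain ⟨h1, h2, h3, h4⟩ := inner_parallel idx
          (idx_list.filter (fun x => gKey imdim x = gMKey imdim idx)) out uL uS hmem
        set G := idx_list.filter (fun x => gKey imdim x = gMKey imdim idx) with hGdef
        set stA := G.foldl (gStepA idx) (out, uL) with hstA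
        set p := G.foldl (gStepB idx) (out, uS) with hp
        have hinv' : gDictInv idx_list imdim (D.insert (gMKey imdim idx) []) p.2 := by
          intro k
          by_cases hk : k = gMKey imdim idx
          · subst hk
            refine ⟨fun h => absurd h hG, fun _ => Or.inr ⟨?_, ?_⟩⟩
            · exact PySem.Dict.get?_insert_self _ _ _
            · exact h4
          · constructor
            · intro h
              rw [PySem.Dict.get?_insert, if_neg hk]
              exact (hinv k).1 h
            · intro h
              rw [PySem.Dict.get?_insert, if_neg hk]
              rcases (hinv k).2 h with h' | ⟨h', h''⟩
              · exact Or.inl h'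
              · exact Or.inr ⟨h', fun x hx => h3 x (h'' x hx)⟩
        have := ih p.1 stA.2 p.2 (D.insert (gMKey imdim idx) []) h2 hinv'
        have hsplit : stA = (p.1, stA.2) := by
          rw [← h1]
        rw [hsplit]
        exact this

-- the dict invariant holds for the freshly built buckets
theorem gDictInv_init (idx_list : List (List Int)) (imdim : Int) :
    gDictInv idx_list imdim (gBuckets idx_list imdim) PySem.Set.empty := by
  intro k
  rw [gBuckets_get? idx_list imdim k]
  constructor
  · intro h; rw [if_pos h]
  · intro h; rw [if_neg h]; exact Or.inl rfl

-- ===== VERDICT (by name: the statement is the Claim_ definition above) =====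
theorem group_idxs_spec : Claim_equal_group_idxs := by
  intro idx_list imdim _ _
  unfold Spec_group_idxs
  have hA : group_idxs idx_list imdim
      = (idx_list.foldl (fun st idx =>
          (idx_list.filter (fun x => gKey imdim x = gMKey imdim idx)).foldl (gStepA idx) st)
        (([] : List (List (List Int))), ([] : List (List Int)))).1 := by
    simp only [group_idxs, innerA_eq_filter]
  rw [hA]
  exact outer_parallel idx_list idx_list imdim [] [] PySem.Set.empty
    (gBuckets idx_list imdim) (by simp [PySem.Set.empty]) (gDictInv_init idx_list imdim)
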